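-- pv_equiv track=rewrite | github.com/mroncarelli/xraysim | tests/test_full_run.py | history_unpack
-- ===== SOURCE A (Python) =====
-- def history_unpack(history: list) -> list:
--     """
--     Modifies a HISTORY list record by appending lines that correspond to the same record.
--     :param history: (list of str) HISTORY record.
--     :return: (list of str) Modified HISTORY record.
--     """
--     result = []
--     for index, record in enumerate(history):
--         if index > 0 and record.startswith('P') and record.split(' ')[0] == history[index - 1].split(' ')[0]:
--             result[-1] += record[record.index(' ') + 1:]
--         else:
--             result.append(record)
--     return result
-- ===== SOURCE B (Python) =====
-- def history_unpack(history: list) -> list: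
--     """Group-then-process re-implementation: first split the history into maximal
--     runs of consecutive records sharing the same first token, then emit each run's
--     head unchanged and fold the remaining members in ('P'-records are appended to
--     the previously emitted line, others start a new line)."""
--     groups = []
--     for rec in history:
--         tok = rec.split(' ')[0]
--         if groups and groups[-1][0] == tok:
--             groups[-1][1].append(rec)
--         else:
--             groups.append((tok, [rec]))
--     result = []
--     for _, grp in groups:
--         result.append(grp[0])
--         for rec in grp[1:]:
--             if rec.startswith('P'):
--                 result[-1] += rec[rec.index(' ') + 1:]
--             else:
--                 result.append(rec)
--     return result
-- ===== Notes on version B (the rewrite author's own statement) =====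
-- stated objective: alternative
-- what changed: Replaces A's flat index-based scan (which re-splits history[index-1] at every step) by a two-phase group-then-process decomposition: first build the maximal runs of consecutive records sharing the same first token, then emit each run's head and fold the remaining members in.
import Mathlib
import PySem

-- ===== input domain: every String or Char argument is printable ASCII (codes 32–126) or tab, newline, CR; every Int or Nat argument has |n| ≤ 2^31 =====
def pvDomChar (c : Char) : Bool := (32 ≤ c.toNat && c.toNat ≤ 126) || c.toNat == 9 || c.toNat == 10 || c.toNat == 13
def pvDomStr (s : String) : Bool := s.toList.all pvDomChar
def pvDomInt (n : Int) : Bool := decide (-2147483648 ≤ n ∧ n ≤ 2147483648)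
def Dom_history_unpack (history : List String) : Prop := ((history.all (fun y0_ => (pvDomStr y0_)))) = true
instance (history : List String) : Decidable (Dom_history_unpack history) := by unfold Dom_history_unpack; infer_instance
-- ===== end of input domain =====

-- B replaces A's flat index-based scan by a group-then-process decomposition
-- (build maximal runs of records sharing the first token, then fold each run);
-- an alternative of the same cost, proved to return the same value on Pre_.


-- shared helpers: Python's r.split(' ')[0] and r[r.index(' ')+1:]
-- (both Python sources contain these very subexpressions)
def pvTok (r : String) : String :=
  (PySem.List.pyGet? ((PySem.Str.split? r " ").getD []) 0).getD ""

def pvCont (r : String) : String :=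
  PySem.Str.slice r (some (PySem.Str.find r " " + 1)) none

-- ===== PORT A =====
-- loop body of A's single enumerate loop
def pvStepA (history result : List String) (p : Int × String) : List String :=
  if 0 < p.1 ∧ PySem.Str.startswith p.2 "P" = true ∧
      pvTok p.2 = pvTok ((PySem.List.pyGet? history (p.1 - 1)).getD "")
  then result.dropLast ++ [result.getLast?.getD "" ++ pvCont p.2]
  else result ++ [p.2]

def history_unpack (history : List String) : List String :=
  (PySem.List.enumerate history).foldl (pvStepA history) []

-- ===== PORT B =====
-- phase 1 loop body: extend the last run if the first token matches, else open a new run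
def pvGStep (gs : List (String × List String)) (r : String) : List (String × List String) :=
  let t := pvTok r
  match gs.getLast? with
  | some g => if g.1 = t then gs.dropLast ++ [(t, g.2 ++ [r])] else gs ++ [(t, [r])]
  | none => gs ++ [(t, [r])]

-- phase 2 inner loop body: merge a 'P' record into the last emitted line, else emit it
def pvStepB (res : List String) (r : String) : List String :=
  if PySem.Str.startswith r "P" = true
  then res.dropLast ++ [res.getLast?.getD "" ++ pvCont r]
  else res ++ [r]

-- phase 2 per-run body: emit the run's head, fold the rest in
def pvProcGroup (result : List String) (g : String × List String) : List String :=
  match g.2 with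
  | [] => result
  | g0 :: rest => rest.foldl pvStepB (result ++ [g0])

def history_unpack_alt (history : List String) : List String :=
  (history.foldl pvGStep []).foldl pvProcGroup []

-- ===== PRECONDITION & SPEC =====
-- Pre_ excludes exactly the inputs on which Python A raises ValueError: a record that
-- starts with 'P', shares its first token with the preceding record, but contains no
-- space (record.index(' ') raises there; B raises the same way).
def Pre_history_unpack (history : List String) : Prop :=
  ∀ p ∈ history.zip history.tail,
    PySem.Str.startswith p.2 "P" = true → pvTok p.2 = pvTok p.1 →
    PySem.Str.find p.2 " " ≠ -1

instance (history : List String) : Decidable (Pre_history_unpack history) := by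
  unfold Pre_history_unpack; infer_instance

def pvWitness_history_unpack : List String := ["P1 a", "P1 b", "XTENSION c", "P1 d"]

def Spec_history_unpack (history : List String) (out : List String) : Prop := out = history_unpack_alt history
instance (history : List String) (out : List String) : Decidable (Spec_history_unpack history out) := by unfold Spec_history_unpack; infer_instance

-- ===== CLAIM (what is proved, stated in full; the proofs are below) =====
def Claim_equal_history_unpack : Prop := ∀ (history : List String), Dom_history_unpack history → Pre_history_unpack history → Spec_history_unpack history (history_unpack history)

-- ===== LEMMAS AND PROOFS =====

-- common specification: one left-to-right pass carrying the previous original record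
def pvStepS (res : List String) (prev r : String) : List String :=
  if PySem.Str.startswith r "P" = true ∧ pvTok r = pvTok prev
  then res.dropLast ++ [res.getLast?.getD "" ++ pvCont r]
  else res ++ [r]

def pvLoopS (res : List String) (prev : String) : List String → List String
  | [] => res
  | r :: rs => pvLoopS (pvStepS res prev r) r rs

def pvSpecList : List String → List String
  | [] => []
  | h :: t => pvLoopS [h] h t

-- A's enumerate fold, started at index k+1 on the suffix after prev, is the spec loop
lemma pvA_loop (full : List String) :
    ∀ (suffix : List String) (k : Nat) (prev : String) (res : List String),
      full.drop k = prev :: suffix →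
      (PySem.List.enumerate suffix ((k : Int) + 1)).foldl (pvStepA full) res
        = pvLoopS res prev suffix := by
  intro suffix
  induction suffix with
  | nil => intro k prev res _; simp [PySem.List.enumerate_nil, pvLoopS]
  | cons r rs ih =>
    intro k prev res hdrop
    have hget : full[k]? = some prev := by
      have h0 : (full.drop k)[0]? = some prev := by rw [hdrop]; rfl
      rw [List.getElem?_drop] at h0
      simpa using h0
    rw [PySem.List.enumerate_cons]
    simp only [List.foldl_cons]
    have hstep : pvStepA full res ((k : Int) + 1, r) = pvStepS res prev r := by
      unfold pvStepA pvStepS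
      have h1 : ((k : Int) + 1 - 1) = (k : Int) := by ring
      rw [h1]
      have h2 : PySem.List.pyGet? full (k : Int) = some prev := by
        rw [PySem.List.pyGet?_natCast]; exact hget
      rw [h2]
      simp
    rw [hstep]
    have hdrop' : full.drop (k + 1) = r :: rs := by
      rw [← List.tail_drop, hdrop]; rfl
    have hcast : ((k : Int) + 1 + 1) = (((k + 1 : Nat) : Int) + 1) := by push_cast; ring
    rw [hcast, ih (k + 1) r (pvStepS res prev r) hdrop']
    rfl

lemma pvA_eq (history : List String) : history_unpack history = pvSpecList history := by
  cases history with
  | nil => simp [history_unpack, PySem.List.enumerate_nil, pvSpecList]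
  | cons h t =>
    unfold history_unpack pvSpecList
    rw [PySem.List.enumerate_cons]
    simp only [List.foldl_cons]
    have h0 : pvStepA (h :: t) [] (0, h) = [h] := by
      unfold pvStepA; simp
    rw [h0]
    have := pvA_loop (h :: t) t 0 h [h] (by simp)
    simpa using this

-- the default of getLastD is irrelevant on a nonempty list
lemma pvGetD_cons_ne (a : String) (l : List String) (d d' : String) :
    (a :: l).getLast?.getD d = (a :: l).getLast?.getD d' := by
  cases h : (a :: l).getLast? with
  | none => exact absurd h (by simp)
  | some x => rfl

-- shape of the groups after appending a record: the last run ends with that record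
lemma pvBuild_last (xs : List String) (r : String) :
    ∃ gs grp, (xs ++ [r]).foldl pvGStep [] = gs ++ [(pvTok r, grp ++ [r])] := by
  rw [List.foldl_append]
  simp only [List.foldl_cons, List.foldl_nil]
  generalize xs.foldl pvGStep [] = acc
  cases hlast : acc.getLast? with
  | none => exact ⟨acc, [], by simp [pvGStep, hlast]⟩
  | some g =>
    by_cases hk : g.1 = pvTok r
    · exact ⟨acc.dropLast, g.2, by simp [pvGStep, hlast, hk]⟩
    · exact ⟨acc, [], by simp [pvGStep, hlast, hk]⟩

lemma pvLoopS_append (l : List String) :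
    ∀ (res : List String) (prev r : String),
      pvLoopS res prev (l ++ [r]) = pvStepS (pvLoopS res prev l) (l.getLastD prev) r := by
  induction l with
  | nil => intro res prev r; simp [pvLoopS]
  | cons x xs ih =>
    intro res prev r
    simp only [List.cons_append, pvLoopS]
    rw [ih]
    congr 1
    cases xs with
    | nil => simp
    | cons b bs => exact pvGetD_cons_ne b bs x prev

lemma pvSpec_append (xs : List String) (r : String) (hne : xs ≠ []) :
    pvSpecList (xs ++ [r]) = pvStepS (pvSpecList xs) (xs.getLastD "") r := by
  cases xs with
  | nil => exact absurd rfl hne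
  | cons h t =>
    simp only [List.cons_append, pvSpecList]
    rw [pvLoopS_append]
    congr 1
    cases t with
    | nil => simp
    | cons b bs => exact pvGetD_cons_ne b bs h ""

-- the main grouping invariant: the second phase of B computes the spec
lemma pvB_eq (history : List String) :
    (history.foldl pvGStep []).foldl pvProcGroup [] = pvSpecList history := by
  induction history using List.reverseRecOn with
  | nil => rfl
  | append_singleton xs r ih =>
    cases xs using List.reverseRecOn with
    | nil =>
      simp [pvGStep, pvProcGroup, pvSpecList, pvLoopS]
    | append_singleton ys r' _ =>
      obtain ⟨gs, grp, hB⟩ := pvBuild_last ys r'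
      have hlastxs : (ys ++ [r']).getLastD "" = r' := by
        simp [List.getLastD_eq_getLast?]
      rw [pvSpec_append (ys ++ [r']) r (by simp), hlastxs]
      rw [List.foldl_append (f := pvGStep)]
      simp only [List.foldl_cons, List.foldl_nil]
      by_cases hk : pvTok r' = pvTok r
      · -- extend the last run
        have hg : pvGStep ((ys ++ [r']).foldl pvGStep []) r
            = gs ++ [(pvTok r, (grp ++ [r']) ++ [r])] := by
          rw [hB]
          unfold pvGStep
          simp [hk]
        rw [hg, List.foldl_append]
        simp only [List.foldl_cons, List.foldl_nil]
        have hrun : pvProcGroup (gs.foldl pvProcGroup []) (pvTok r, (grp ++ [r']) ++ [r])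
            = pvStepB (pvProcGroup (gs.foldl pvProcGroup []) (pvTok r, grp ++ [r'])) r := by
          cases grp with
          | nil => simp [pvProcGroup]
          | cons g0 rest =>
            simp only [List.cons_append, pvProcGroup]
            rw [List.foldl_append]
            rfl
        rw [hrun]
        have hback : pvProcGroup (gs.foldl pvProcGroup []) (pvTok r, grp ++ [r'])
            = ((ys ++ [r']).foldl pvGStep []).foldl pvProcGroup [] := by
          simp only [hB, List.foldl_append, List.foldl_cons, List.foldl_nil, hk]
        rw [hback, ih]
        unfold pvStepS pvStepB
        simp [hk]
      · -- open a new run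
        have hg : pvGStep ((ys ++ [r']).foldl pvGStep []) r
            = ((ys ++ [r']).foldl pvGStep []) ++ [(pvTok r, [r])] := by
          rw [hB]
          unfold pvGStep
          simp [hk]
        rw [hg, List.foldl_append]
        simp only [List.foldl_cons, List.foldl_nil]
        have hnew : pvProcGroup (((ys ++ [r']).foldl pvGStep []).foldl pvProcGroup [])
            (pvTok r, [r])
            = (((ys ++ [r']).foldl pvGStep []).foldl pvProcGroup []) ++ [r] := rfl
        rw [hnew, ih]
        unfold pvStepS
        rw [if_neg]
        rintro ⟨-, h⟩
        exact hk h.symm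

-- ===== VERDICT (by name: the statement is the Claim_ definition above) =====
theorem history_unpack_spec : Claim_equal_history_unpack := by
  intro history _ _
  unfold Spec_history_unpack
  rw [pvA_eq, history_unpack_alt, pvB_eq]
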